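-- pv_equiv track=rewrite | github.com/LemonHX/Chiba | generate_chiba_utils_refl_impl.py | generate_expand_metadata
-- ===== SOURCE A (Python) =====
-- def generate_expand_metadata(count):
--     """生成 EXPAND_FIELD_METADATA 展开"""
--     parts = [f"EXPAND_FIELD_METADATA_WITH_OFFSET(struct CHIBA_##struct_name##_struct, field{i})" for i in range(1, count + 1)]
--     # 每3个字段换行，保持代码美观
--     result = []
--     for i in range(0, len(parts), 3):
--         chunk = parts[i:i+3]
--         if i + 3 < len(parts):
--             result.append(" ".join(chunk) + " \\")
--         else:
--             result.append(" ".join(chunk))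
--     return "\n      ".join(result)
-- ===== SOURCE B (Python) =====
-- def generate_expand_metadata(count):
--     """生成 EXPAND_FIELD_METADATA 展开"""
--     out = ""
--     for i in range(1, count + 1):
--         if i == 1:
--             sep = ""
--         elif (i - 1) % 3 == 0:
--             sep = " \\\n      "
--         else:
--             sep = " "
--         out += sep + f"EXPAND_FIELD_METADATA_WITH_OFFSET(struct CHIBA_##struct_name##_struct, field{i})"
--     return out
-- ===== Notes on version B (the rewrite author's own statement) =====
-- stated objective: simpler
-- what changed: Drops the intermediate parts list, the chunk loop over range(0,len,3) with slicing, and the two joins: B makes one pass over the field indices, appending each field with a separator chosen from its position (nothing first, a space inside a group of three, backslash-newline after every third field).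
import Mathlib
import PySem

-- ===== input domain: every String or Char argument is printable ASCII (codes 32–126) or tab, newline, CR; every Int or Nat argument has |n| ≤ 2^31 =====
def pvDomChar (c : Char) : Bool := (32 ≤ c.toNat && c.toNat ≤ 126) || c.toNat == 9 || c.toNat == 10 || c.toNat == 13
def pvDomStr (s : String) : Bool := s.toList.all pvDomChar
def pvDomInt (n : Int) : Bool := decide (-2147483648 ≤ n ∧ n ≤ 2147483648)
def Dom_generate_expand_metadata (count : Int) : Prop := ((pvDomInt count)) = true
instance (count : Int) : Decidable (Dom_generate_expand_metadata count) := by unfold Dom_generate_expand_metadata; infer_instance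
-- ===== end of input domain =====

-- B drops A's intermediate parts list, chunk-of-3 slicing loop and joins, building the same string
-- in one pass with a position-chosen separator: a simpler decomposition, same O(n) cost.

-- ===== PORT A =====
-- the f-string body of A's list comprehension
def pvFieldA (i : Int) : String :=
  "EXPAND_FIELD_METADATA_WITH_OFFSET(struct CHIBA_##struct_name##_struct, field" ++ PySem.Int.toStr i ++ ")"

def generate_expand_metadata (count : Int) : String :=
  let parts : List String := (PySem.List.pyRange 1 (count + 1) 1).map pvFieldA
  let result : List String :=
    (PySem.List.pyRange 0 (PySem.List.len parts) 3).foldl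
      (fun res i =>
        let chunk := PySem.List.slice parts (some i) (some (i + 3))
        if i + 3 < PySem.List.len parts then
          res ++ [PySem.Str.join " " chunk ++ " \\"]
        else
          res ++ [PySem.Str.join " " chunk]) []
  PySem.Str.join "\n      " result

-- ===== PORT B =====
-- the f-string body of B's loop
def pvFieldB (i : Int) : String :=
  "EXPAND_FIELD_METADATA_WITH_OFFSET(struct CHIBA_##struct_name##_struct, field" ++ PySem.Int.toStr i ++ ")"

def generate_expand_metadata_alt (count : Int) : String :=
  (PySem.List.pyRange 1 (count + 1) 1).foldl
    (fun out i =>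
      let sep : String :=
        if i == 1 then ""
        else if PySem.Int.mod (i - 1) 3 == 0 then " \\\n      "
        else " "
      out ++ (sep ++ pvFieldB i)) ""

-- ===== PRECONDITION & SPEC =====
def Spec_generate_expand_metadata (count : Int) (out : String) : Prop := out = generate_expand_metadata_alt count
instance (count : Int) (out : String) : Decidable (Spec_generate_expand_metadata count out) := by unfold Spec_generate_expand_metadata; infer_instance

-- ===== CLAIM (what is proved, stated in full; the proofs are below) =====
def Claim_equal_generate_expand_metadata : Prop := ∀ (count : Int), Dom_generate_expand_metadata count → Spec_generate_expand_metadata count (generate_expand_metadata count)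

-- ===== LEMMAS AND PROOFS =====

-- fields numbered 1,…,n as strings (both ports emit this same text)
def pvF (k : Nat) : String := pvFieldA (1 + (k : Int))

-- A's parts list for n fields
def pvParts (n : Nat) : List String := (List.range n).map pvF

-- one chunk string of A: fields 3k,…,3k+2 (0-based), trailing backslash when more fields follow
def pvCs (n k : Nat) : String :=
  if 3 * k + 3 < n then PySem.Str.join " " (((pvParts n).drop (3 * k)).take 3) ++ " \\"
  else PySem.Str.join " " (((pvParts n).drop (3 * k)).take 3)

-- normalized A: join of the ⌈n/3⌉ chunk strings
def pvA (n : Nat) : String := PySem.Str.join "\n      " ((List.range ((n + 2) / 3)).map (pvCs n))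

-- normalized B: one flat pass with a position-chosen separator
def pvFlat (n : Nat) : String :=
  (List.range n).foldl
    (fun s k => s ++ ((if k = 0 then "" else if k % 3 = 0 then " \\\n      " else " ") ++ pvF k)) ""

theorem cjoin_snoc (sep y : List Char) : ∀ (xs : List (List Char)), xs ≠ [] →
    PySem.Chars.join sep (xs ++ [y]) = PySem.Chars.join sep xs ++ sep ++ y
  | [], h => absurd rfl h
  | [a], _ => by
      simp only [List.cons_append, List.nil_append, PySem.Chars.join_cons_cons,
        PySem.Chars.join_singleton]
  | a :: b :: t, _ => by
      have ih := cjoin_snoc sep y (b :: t) (by simp)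
      simp only [List.cons_append, PySem.Chars.join_cons_cons] at *
      rw [ih]
      simp [List.append_assoc]

theorem sjoin_snoc (sep y : String) (xs : List String) (h : xs ≠ []) :
    PySem.Str.join sep (xs ++ [y]) = PySem.Str.join sep xs ++ sep ++ y := by
  apply String.toList_inj.mp
  simp only [String.toList_append, PySem.Str.toList_join, List.map_append, List.map_cons,
    List.map_nil]
  rw [cjoin_snoc]
  simpa using h

theorem sjoin_singleton (sep x : String) : PySem.Str.join sep [x] = x := by
  apply String.toList_inj.mp
  simp [PySem.Str.toList_join, PySem.Chars.join_singleton]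

theorem sjoin_snoc_append (sep a t : String) (xs : List String) :
    PySem.Str.join sep (xs ++ [a ++ t]) = PySem.Str.join sep (xs ++ [a]) ++ t := by
  cases xs with
  | nil => simp [sjoin_singleton]
  | cons p q =>
      rw [sjoin_snoc _ _ _ (by simp), sjoin_snoc _ _ _ (by simp)]
      simp [String.append_assoc]

theorem pvFlat_succ (n : Nat) : pvFlat (n + 1) =
    pvFlat n ++ ((if n = 0 then "" else if n % 3 = 0 then " \\\n      " else " ") ++ pvF n) := by
  unfold pvFlat
  rw [List.range_succ, List.foldl_append]
  rfl

theorem pvParts_succ (n : Nat) : pvParts (n + 1) = pvParts n ++ [pvF n] := by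
  unfold pvParts
  rw [List.range_succ, List.map_append]
  rfl

theorem length_pvParts (n : Nat) : (pvParts n).length = n := by simp [pvParts]

-- a chunk is unchanged by adding field n when it lies fully inside the old parts
theorem chunk_stable (n k : Nat) (h : 3 * k + 3 ≤ n) :
    ((pvParts (n + 1)).drop (3 * k)).take 3 = ((pvParts n).drop (3 * k)).take 3 := by
  rw [pvParts_succ, List.drop_append_of_le_length (by rw [length_pvParts]; omega),
    List.take_append_of_le_length (by rw [List.length_drop, length_pvParts]; omega)]

theorem pvCs_stable (n k : Nat) (h : 3 * k + 3 < n) : pvCs (n + 1) k = pvCs n k := by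
  unfold pvCs
  rw [chunk_stable n k (by omega), if_pos (by omega), if_pos h]

theorem pvA_eq_pvFlat (n : Nat) : pvA n = pvFlat n := by
  induction n with
  | zero => rfl
  | succ n ih =>
    rcases Nat.eq_zero_or_pos n with hn0 | hn1
    · subst hn0
      show pvA 1 = pvFlat 1
      unfold pvA pvFlat
      simp [List.range_succ, pvCs, pvParts, sjoin_singleton]
    obtain ⟨K0, hK⟩ : ∃ K0, (n + 2) / 3 = K0 + 1 := ⟨(n + 2) / 3 - 1, by omega⟩
    have hmc : List.map (pvCs (n + 1)) (List.range K0) = List.map (pvCs n) (List.range K0) := by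
      apply List.map_congr_left
      intro k hk
      rw [List.mem_range] at hk
      exact pvCs_stable n k (by omega)
    by_cases h3 : n % 3 = 0
    · -- last chunk was full: it gains " \", and a new singleton chunk appears
      have h3K : 3 * (K0 + 1) = n := by omega
      have hK' : (n + 1 + 2) / 3 = (K0 + 1) + 1 := by omega
      have hlast : pvCs (n + 1) K0 = pvCs n K0 ++ " \\" := by
        unfold pvCs
        rw [chunk_stable n K0 (by omega), if_pos (by omega), if_neg (by omega)]
      have hnew : pvCs (n + 1) (K0 + 1) = pvF n := by
        unfold pvCs
        rw [if_neg (by omega), pvParts_succ,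
          List.drop_append_of_le_length (by rw [length_pvParts]; omega)]
        have : (pvParts n).drop (3 * (K0 + 1)) = [] := by
          apply List.drop_eq_nil_of_le
          rw [length_pvParts]; omega
        rw [this, List.nil_append]
        simp [sjoin_singleton]
      rw [pvFlat_succ, if_neg (by omega), if_pos h3, ← ih]
      unfold pvA
      rw [hK, hK']
      rw [List.range_succ, List.range_succ]
      simp only [List.map_append, List.map_singleton, hmc, hlast, hnew]
      rw [sjoin_snoc _ _ _ (by simp), sjoin_snoc_append]
      rw [String.append_assoc, String.append_assoc]
      rfl
    · -- last chunk not yet full: it gains a space and the new field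
      have hK' : (n + 1 + 2) / 3 = K0 + 1 := by omega
      have hlen : ((pvParts n).drop (3 * K0)).length = n - 3 * K0 := by
        rw [List.length_drop, length_pvParts]
      have hlast : pvCs (n + 1) K0 = pvCs n K0 ++ (" " ++ pvF n) := by
        unfold pvCs
        rw [if_neg (by omega), if_neg (by omega), pvParts_succ,
          List.drop_append_of_le_length (by rw [length_pvParts]; omega)]
        rw [List.take_of_length_le (by simp [hlen]; omega),
          List.take_of_length_le (by rw [hlen]; omega)]
        rw [sjoin_snoc _ _ _ (by intro hc; rw [← List.length_eq_zero_iff] at hc; omega)]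
        rw [String.append_assoc]
      rw [pvFlat_succ, if_neg (by omega), if_neg h3, ← ih]
      unfold pvA
      rw [hK, hK']
      rw [List.range_succ]
      simp only [List.map_append, List.map_singleton, hmc, hlast]
      rw [sjoin_snoc_append]

theorem portA_norm (count : Int) : generate_expand_metadata count = pvA count.toNat := by
  unfold generate_expand_metadata pvA
  dsimp only
  have h1 : count + 1 - 1 = count := by ring
  rw [PySem.List.pyRange_one, h1]
  set n := count.toNat with hn
  rw [List.map_map]
  have hparts : List.map (pvFieldA ∘ fun (k : Nat) => 1 + (k : Int)) (List.range n) = pvParts n := rfl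
  rw [hparts]
  have hlen : PySem.List.len (pvParts n) = (n : Int) := by simp [pvParts]
  rw [hlen]
  rw [PySem.List.pyRange_of_pos 0 (n : Int) (by norm_num : (0:Int) < 3)]
  have hK : (if (0:Int) < (n:Int) then (((n:Int) - 0 + 3 - 1) / 3).toNat else 0) = (n + 2) / 3 := by
    by_cases h : 0 < n
    · rw [if_pos (by exact_mod_cast h)]
      have h2 : (n:Int) - 0 + 3 - 1 = ((n + 2 : Nat) : Int) := by push_cast; ring
      rw [h2, show ((3:Int)) = ((3:Nat):Int) from rfl, ← Int.natCast_div, Int.toNat_natCast]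
    · rw [if_neg (by simp; omega)]
      omega
  rw [hK, List.foldl_map]
  have hbody : ∀ (res : List String) (k : Nat), k ∈ List.range ((n + 2) / 3) →
      (fun res (k : Nat) =>
        if 0 + 3 * (k:Int) + 3 < (n:Int) then
          res ++ [PySem.Str.join " " (PySem.List.slice (pvParts n) (some (0 + 3 * (k:Int))) (some (0 + 3 * (k:Int) + 3))) ++ " \\"]
        else
          res ++ [PySem.Str.join " " (PySem.List.slice (pvParts n) (some (0 + 3 * (k:Int))) (some (0 + 3 * (k:Int) + 3)))]) res k = res ++ [pvCs n k] := by
    intro res k _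
    simp only []
    have hc : (0 + 3 * ((k:Nat):Int)) = ((3 * k : Nat) : Int) := by push_cast; ring
    simp only [hc]
    have hsl : PySem.List.slice (pvParts n) (some ((3*k : Nat):Int)) (some (((3*k : Nat):Int) + ((3:Nat):Int))) =
        ((pvParts n).drop (3*k)).take 3 := PySem.List.slice_natCast_add _ _ _
    have hcond : (((3*k : Nat):Int) + 3 < (n:Int)) ↔ (3 * k + 3 < n) := by push_cast; omega
    simp only [show (((3:Nat)):Int) = (3:Int) from rfl] at hsl
    simp only [hsl, pvCs]
    by_cases h : 3 * k + 3 < n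
    · rw [if_pos (hcond.mpr h), if_pos h]
    · rw [if_neg (fun hh => h (hcond.mp hh)), if_neg h]
  rw [PySem.List.foldl_congr_mem _ _ (fun (res : List String) (k : Nat) => res ++ [pvCs n k]) _ hbody]
  rw [PySem.List.foldl_append_singleton_eq_map]
  rfl

theorem portB_norm (count : Int) : generate_expand_metadata_alt count = pvFlat count.toNat := by
  unfold generate_expand_metadata_alt pvFlat
  have h1 : count + 1 - 1 = count := by ring
  rw [PySem.List.pyRange_one, h1, List.foldl_map]
  apply PySem.List.foldl_congr_mem
  intro acc k _
  have hmod : 1 + (k:Int) - 1 = (k:Int) := by ring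
  have hk0 : ((1 + (k:Int)) == 1) = decide (k = 0) := by
    rw [Bool.eq_iff_iff, beq_iff_eq, decide_eq_true_iff]; omega
  have h3 : (PySem.Int.mod (k:Int) 3 == 0) = decide (k % 3 = 0) := by
    rw [Bool.eq_iff_iff, beq_iff_eq, decide_eq_true_iff, PySem.Int.mod_eq_zero_iff_dvd]
    omega
  simp only [hmod, hk0, h3]
  by_cases h : k = 0 <;> by_cases h2 : k % 3 = 0 <;> simp [h, h2, pvF, pvFieldA, pvFieldB]

-- ===== VERDICT (by name: the statement is the Claim_ definition above) =====
theorem generate_expand_metadata_spec : Claim_equal_generate_expand_metadata := by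
  intro count _
  show _ = _
  rw [portA_norm, portB_norm, pvA_eq_pvFlat]
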